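-- pv_equiv track=rewrite | github.com/jmadeano/antonym-analysis | helpers.py | is_morphological_negation
-- ===== SOURCE A (Python) =====
-- def is_morphological_negation(word, antonym, lowercase = True):
--     '''
--     Given an original word and an antonym, check if the antonym is a morphological negation
--     of the word (in-, im-, un-, dis-, ir-, ab-, a-  + word). Returns a boolean.
--
--     Keyword arguments:
--     word -- the origial word
--     antonym -- an antonym of word that may be a morphological antonym of word
--     lowercase -- optional parameter, when lowercase = false the words are not lowercased
--     '''
--     if lowercase:
--         antonym = antonym.lower()
--         word = word.lower()
--
--     for prefix in ('ir', 'in', 'im', 'un', 'dis', 'ab', 'a'):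
--         p_len = len(prefix)
--
--         # antonym - prefix = word and antonym starts with prefix
--         if antonym[p_len:] == word and antonym[:p_len] == prefix:
--             return True
--
--     return False
-- ===== SOURCE B (Python) =====
-- # Trie/DFA of the negation prefixes ('ir','in','im','un','dis','ab','a')
-- # flattened into a transition table; accepting states mark a complete prefix.
-- _ACCEPTING = frozenset({1, 2, 4, 5, 6, 8, 11})
-- _DELTA = {
--     (0, 'a'): 1, (1, 'b'): 2,
--     (0, 'i'): 3, (3, 'r'): 4, (3, 'n'): 5, (3, 'm'): 6,
--     (0, 'u'): 7, (7, 'n'): 8,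
--     (0, 'd'): 9, (9, 'i'): 10, (10, 's'): 11,
-- }
--
--
-- def is_morphological_negation(word, antonym, lowercase=True):
--     '''Walk the antonym left-to-right through a DFA (trie) of the negation
--     prefixes; at each accepting state compare the remaining suffix with word.'''
--     if lowercase:
--         antonym = antonym.lower()
--         word = word.lower()
--     state = 0
--     i = 0
--     while True:
--         if state in _ACCEPTING and antonym[i:] == word:
--             return True
--         if i == len(antonym):
--             return False
--         state = _DELTA.get((state, antonym[i]))
--         if state is None:
--             return False
--         i += 1
-- ===== Notes on version B (the rewrite author's own statement) =====
-- stated objective: alternative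
-- what changed: B replaces A's loop over the 7 prefixes (two slice comparisons each) by a single left-to-right walk of the antonym through a hand-built trie/DFA of the prefixes, comparing the remaining suffix with the word at each accepting state.
import Mathlib
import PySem

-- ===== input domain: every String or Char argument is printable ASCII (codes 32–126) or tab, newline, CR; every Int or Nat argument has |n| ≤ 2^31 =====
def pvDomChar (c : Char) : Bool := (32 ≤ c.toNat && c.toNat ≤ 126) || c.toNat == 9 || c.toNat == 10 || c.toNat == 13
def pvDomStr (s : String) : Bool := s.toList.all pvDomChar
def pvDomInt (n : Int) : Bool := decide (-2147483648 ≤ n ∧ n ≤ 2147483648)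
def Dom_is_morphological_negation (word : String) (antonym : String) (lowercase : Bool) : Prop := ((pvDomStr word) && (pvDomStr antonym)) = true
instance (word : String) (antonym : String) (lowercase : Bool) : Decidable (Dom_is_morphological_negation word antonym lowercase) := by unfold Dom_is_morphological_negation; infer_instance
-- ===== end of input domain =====

-- B replaces A's per-prefix loop (two slice comparisons each) by one left-to-right walk of the
-- antonym through a trie/DFA of the 7 negation prefixes; objective: alternative.

-- ===== PORT A =====
def is_morphological_negation (word : String) (antonym : String) (lowercase : Bool) : Bool :=
  let antonym := if lowercase then PySem.Str.lower antonym else antonym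
  let word := if lowercase then PySem.Str.lower word else word
  -- 'for prefix in (…): if …: return True / return False' as List.any, branch order kept
  [("ir" : String), "in", "im", "un", "dis", "ab", "a"].any fun pre =>
    let p_len := PySem.Str.len pre
    (PySem.Str.slice antonym (some p_len) none == word) &&
    (PySem.Str.slice antonym none (some p_len) == pre)

-- ===== PORT B =====
-- _DELTA : the trie/DFA transition table from Source B
def pvDelta (s : Nat) (c : Char) : Option Nat :=
  match s with
  | 0 => if c = 'a' then some 1 else if c = 'i' then some 3
         else if c = 'u' then some 7 else if c = 'd' then some 9 else none
  | 1 => if c = 'b' then some 2 else none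
  | 3 => if c = 'r' then some 4 else if c = 'n' then some 5
         else if c = 'm' then some 6 else none
  | 7 => if c = 'n' then some 8 else none
  | 9 => if c = 'i' then some 10 else none
  | 10 => if c = 's' then some 11 else none
  | _ => none

-- _ACCEPTING
def pvAccept (s : Nat) : Bool := s == 1 || s == 2 || s == 4 || s == 5 || s == 6 || s == 8 || s == 11

-- the 'while True' loop of Source B: rest = antonym[i:], word already lowered; branch order kept
def pvAltLoop (w : List Char) (rest : List Char) (state : Nat) : Bool :=
  if pvAccept state && rest == w then true
  else
    match rest with
    | [] => false
    | c :: rs =>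
      match pvDelta state c with
      | none => false
      | some t => pvAltLoop w rs t

def is_morphological_negation_alt (word : String) (antonym : String) (lowercase : Bool) : Bool :=
  let antonym := if lowercase then PySem.Str.lower antonym else antonym
  let word := if lowercase then PySem.Str.lower word else word
  pvAltLoop word.toList antonym.toList 0

-- ===== PRECONDITION & SPEC =====
def Spec_is_morphological_negation (word : String) (antonym : String) (lowercase : Bool) (out : Bool) : Prop := out = is_morphological_negation_alt word antonym lowercase
instance (word : String) (antonym : String) (lowercase : Bool) (out : Bool) : Decidable (Spec_is_morphological_negation word antonym lowercase out) := by unfold Spec_is_morphological_negation; infer_instance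

-- ===== CLAIM (what is proved, stated in full; the proofs are below) =====
def Claim_equal_is_morphological_negation : Prop := ∀ (word : String) (antonym : String) (lowercase : Bool), Dom_is_morphological_negation word antonym lowercase → Spec_is_morphological_negation word antonym lowercase (is_morphological_negation word antonym lowercase)

-- ===== LEMMAS AND PROOFS =====

-- run the DFA along a whole prefix
def pvWalk : Nat → List Char → Option Nat
  | s, [] => some s
  | s, c :: cs =>
    match pvDelta s c with
    | none => none
    | some t => pvWalk t cs

def pvPrefixLists : List (List Char) :=
  [['i','r'], ['i','n'], ['i','m'], ['u','n'], ['d','i','s'], ['a','b'], ['a']]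

-- the loop succeeds iff some prefix of rest is accepted by the DFA and the remainder is w
theorem pv_altLoop_iff (w : List Char) : ∀ (rest : List Char) (s : Nat),
    pvAltLoop w rest s = true ↔
      ∃ u t, rest = u ++ w ∧ pvWalk s u = some t ∧ pvAccept t = true := by
  intro rest
  induction rest with
  | nil =>
    intro s
    rw [pvAltLoop]
    constructor
    · intro h
      split_ifs at h with hc
      · simp only [Bool.and_eq_true, beq_iff_eq] at hc
        exact ⟨[], s, by simp [hc.2], rfl, hc.1⟩
    · rintro ⟨u, t, hrest, hwalk, hacc⟩
      have hu : u = [] := by cases u <;> simp_all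
      subst hu
      simp only [List.nil_append] at hrest
      simp only [pvWalk, Option.some.injEq] at hwalk
      subst hwalk
      simp [hacc, ← hrest]
  | cons c rs ih =>
    intro s
    rw [pvAltLoop]
    constructor
    · intro h
      split_ifs at h with hc
      · simp only [Bool.and_eq_true, beq_iff_eq] at hc
        exact ⟨[], s, by simp [hc.2], rfl, hc.1⟩
      · cases hd : pvDelta s c with
        | none => simp [hd] at h
        | some t0 =>
          simp only [hd] at h
          obtain ⟨u, t, hrest, hwalk, hacc⟩ := (ih t0).mp h
          exact ⟨c :: u, t, by simp [hrest], by simp [pvWalk, hd, hwalk], hacc⟩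
    · rintro ⟨u, t, hrest, hwalk, hacc⟩
      split_ifs with hc
      · rfl
      · cases u with
        | nil =>
          simp only [pvWalk, Option.some.injEq] at hwalk
          subst hwalk
          simp only [List.nil_append] at hrest
          simp [hacc, hrest] at hc
        | cons c0 u' =>
          simp only [List.cons_append, List.cons.injEq] at hrest
          obtain ⟨rfl, hrs⟩ := hrest
          simp only [pvWalk] at hwalk
          cases hd : pvDelta s c with
          | none => simp [hd] at hwalk
          | some t0 =>
            simp only [hd] at hwalk ⊢
            exact (ih t0).mpr ⟨u', t, hrs, hwalk, hacc⟩

-- dead-end / single-step state facts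
theorem pv_walk_dead (u : List Char) (t s : Nat)
    (hs : s = 2 ∨ s = 4 ∨ s = 5 ∨ s = 6 ∨ s = 8 ∨ s = 11)
    (h : pvWalk s u = some t) : t = s ∧ u = [] := by
  cases u with
  | nil => simp only [pvWalk, Option.some.injEq] at h; exact ⟨h.symm, rfl⟩
  | cons c cs =>
    rw [pvWalk] at h
    rcases hs with rfl | rfl | rfl | rfl | rfl | rfl <;> simp [pvDelta] at h

-- accepted strings from the root are exactly the 7 prefixes
theorem pv_walk_accept (u : List Char) (t : Nat)
    (h1 : pvWalk 0 u = some t) (h2 : pvAccept t = true) : u ∈ pvPrefixLists := by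
  cases u with
  | nil =>
    simp only [pvWalk, Option.some.injEq] at h1
    subst h1; simp [pvAccept] at h2
  | cons c1 u1 =>
    simp only [pvWalk] at h1
    simp only [pvDelta] at h1
    split_ifs at h1 with ha hi hu hd
    · -- c1 = 'a', state 1
      subst ha
      cases u1 with
      | nil => simp [pvPrefixLists]
      | cons c2 u2 =>
        simp only [pvWalk] at h1
        simp only [pvDelta] at h1
        split_ifs at h1 with hb
        · subst hb
          obtain ⟨rfl, rfl⟩ := pv_walk_dead u2 t 2 (by omega) h1
          simp [pvPrefixLists]
    · -- c1 = 'i', state 3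
      subst hi
      cases u1 with
      | nil =>
        simp only [pvWalk, Option.some.injEq] at h1
        subst h1; simp [pvAccept] at h2
      | cons c2 u2 =>
        simp only [pvWalk] at h1
        simp only [pvDelta] at h1
        split_ifs at h1 with hr hn hm
        · subst hr
          obtain ⟨rfl, rfl⟩ := pv_walk_dead u2 t 4 (by omega) h1
          simp [pvPrefixLists]
        · subst hn
          obtain ⟨rfl, rfl⟩ := pv_walk_dead u2 t 5 (by omega) h1
          simp [pvPrefixLists]
        · subst hm
          obtain ⟨rfl, rfl⟩ := pv_walk_dead u2 t 6 (by omega) h1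
          simp [pvPrefixLists]
    · -- c1 = 'u', state 7
      subst hu
      cases u1 with
      | nil =>
        simp only [pvWalk, Option.some.injEq] at h1
        subst h1; simp [pvAccept] at h2
      | cons c2 u2 =>
        simp only [pvWalk] at h1
        simp only [pvDelta] at h1
        split_ifs at h1 with hn
        · subst hn
          obtain ⟨rfl, rfl⟩ := pv_walk_dead u2 t 8 (by omega) h1
          simp [pvPrefixLists]
    · -- c1 = 'd', state 9
      subst hd
      cases u1 with
      | nil =>
        simp only [pvWalk, Option.some.injEq] at h1
        subst h1; simp [pvAccept] at h2
      | cons c2 u2 =>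
        simp only [pvWalk] at h1
        simp only [pvDelta] at h1
        split_ifs at h1 with hi2
        · subst hi2
          cases u2 with
          | nil =>
            simp only [pvWalk, Option.some.injEq] at h1
            subst h1; simp [pvAccept] at h2
          | cons c3 u3 =>
            simp only [pvWalk] at h1
            simp only [pvDelta] at h1
            split_ifs at h1 with hs3
            · subst hs3
              obtain ⟨rfl, rfl⟩ := pv_walk_dead u3 t 11 (by omega) h1
              simp [pvPrefixLists]

-- each of the 7 prefixes is accepted from the root
theorem pv_prefix_accepted (u : List Char) (hu : u ∈ pvPrefixLists) :
    ∃ t, pvWalk 0 u = some t ∧ pvAccept t = true := by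
  simp only [pvPrefixLists, List.mem_cons, List.not_mem_nil, or_false] at hu
  rcases hu with rfl | rfl | rfl | rfl | rfl | rfl | rfl
  · exact ⟨4, by decide, by decide⟩
  · exact ⟨5, by decide, by decide⟩
  · exact ⟨6, by decide, by decide⟩
  · exact ⟨8, by decide, by decide⟩
  · exact ⟨11, by decide, by decide⟩
  · exact ⟨2, by decide, by decide⟩
  · exact ⟨1, by decide, by decide⟩

-- A's per-prefix test characterised: both slice comparisons hold iff antonym = prefix ++ word
theorem pv_drop_take_iff (a w p : List Char) :
    (a.drop p.length = w ∧ a.take p.length = p) ↔ a = p ++ w := by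
  constructor
  · rintro ⟨h1, h2⟩
    rw [← h2, ← h1]
    exact (List.take_append_drop _ _).symm
  · rintro rfl
    exact ⟨by simp, by simp⟩

-- A's any over the string prefixes, on the list side
theorem pv_A_iff (w a : String) :
    ([("ir" : String), "in", "im", "un", "dis", "ab", "a"].any fun pre =>
      let p_len := PySem.Str.len pre
      (PySem.Str.slice a (some p_len) none == w) &&
      (PySem.Str.slice a none (some p_len) == pre)) = true ↔
    ∃ u ∈ pvPrefixLists, a.toList = u ++ w.toList := by
  constructor
  · intro hA
    obtain ⟨p, hp, hcond⟩ := List.any_eq_true.mp hA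
    simp only [Bool.and_eq_true, beq_iff_eq] at hcond
    have hlenp : (0 : Int) ≤ PySem.Str.len p := by rw [PySem.Str.len_eq]; positivity
    have h1 : a.toList.drop p.toList.length = w.toList := by
      have := congrArg String.toList hcond.1
      simpa [PySem.Str.toList_slice, PySem.Chars.slice_eq_listSlice,
        PySem.List.slice_from _ hlenp, PySem.Str.len_eq] using this
    have h2 : a.toList.take p.toList.length = p.toList := by
      have := congrArg String.toList hcond.2
      simpa [PySem.Str.toList_slice, PySem.Chars.slice_eq_listSlice,
        PySem.List.slice_to _ hlenp, PySem.Str.len_eq] using this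
    have heq : a.toList = p.toList ++ w.toList := (pv_drop_take_iff _ _ _).mp ⟨h1, h2⟩
    refine ⟨p.toList, ?_, heq⟩
    simp only [List.mem_cons, List.not_mem_nil, or_false] at hp
    rcases hp with rfl | rfl | rfl | rfl | rfl | rfl | rfl <;> decide
  · rintro ⟨u, hu, heq⟩
    apply List.any_eq_true.mpr
    simp only [pvPrefixLists, List.mem_cons, List.not_mem_nil, or_false] at hu
    have key : ∀ (p : String), p.toList = u →
        p ∈ [("ir" : String), "in", "im", "un", "dis", "ab", "a"] →
        ∃ p' ∈ [("ir" : String), "in", "im", "un", "dis", "ab", "a"],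
          ((PySem.Str.slice a (some (PySem.Str.len p')) none == w) &&
           (PySem.Str.slice a none (some (PySem.Str.len p')) == p')) = true := by
      intro p hptl hpmem
      refine ⟨p, hpmem, ?_⟩
      have hlenp : (0 : Int) ≤ PySem.Str.len p := by rw [PySem.Str.len_eq]; positivity
      have heq' : a.toList = p.toList ++ w.toList := by rw [hptl]; exact heq
      simp only [Bool.and_eq_true, beq_iff_eq]
      constructor
      · apply String.toList_inj.mp
        rw [PySem.Str.toList_slice, PySem.Chars.slice_eq_listSlice,
          PySem.List.slice_from _ hlenp, PySem.Str.len_eq]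
        rw [heq']; simp
      · apply String.toList_inj.mp
        rw [PySem.Str.toList_slice, PySem.Chars.slice_eq_listSlice,
          PySem.List.slice_to _ hlenp, PySem.Str.len_eq]
        rw [heq']; simp
    rcases hu with rfl | rfl | rfl | rfl | rfl | rfl | rfl
    · exact key "ir" (by decide) (by decide)
    · exact key "in" (by decide) (by decide)
    · exact key "im" (by decide) (by decide)
    · exact key "un" (by decide) (by decide)
    · exact key "dis" (by decide) (by decide)
    · exact key "ab" (by decide) (by decide)
    · exact key "a" (by decide) (by decide)

-- the common body after optional lowercasing
theorem pv_body_eq (w a : String) :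
    ([("ir" : String), "in", "im", "un", "dis", "ab", "a"].any fun pre =>
      let p_len := PySem.Str.len pre
      (PySem.Str.slice a (some p_len) none == w) &&
      (PySem.Str.slice a none (some p_len) == pre))
    = pvAltLoop w.toList a.toList 0 := by
  rw [Bool.eq_iff_iff, pv_A_iff, pv_altLoop_iff]
  constructor
  · rintro ⟨u, hu, heq⟩
    obtain ⟨t, hw, ha⟩ := pv_prefix_accepted u hu
    exact ⟨u, t, heq, hw, ha⟩
  · rintro ⟨u, t, heq, hw, ha⟩
    exact ⟨u, pv_walk_accept u t hw ha, heq⟩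

-- ===== VERDICT (by name: the statement is the Claim_ definition above) =====
theorem is_morphological_negation_spec : Claim_equal_is_morphological_negation := by
  intro word antonym lowercase _
  unfold Spec_is_morphological_negation is_morphological_negation is_morphological_negation_alt
  exact pv_body_eq _ _
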